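-- pv_equiv track=rewrite | github.com/niotie/pl-ap1-grader | exercises/recursion/backtracking/logimage/answers/nicolas.py | longueurs_blocs
-- ===== SOURCE A (Python) =====
-- def longueurs_blocs(L):
--     ans = []
--     cumul = 0
--     for i in L:
--         if i:
--             cumul += 1
--         elif cumul != 0:
--             ans.append(cumul)
--             cumul = 0
--     if cumul:
--         ans.append(cumul)
--     return ans
-- ===== SOURCE B (Python) =====
-- def longueurs_blocs(L):
--     res = []
--     rest = L
--     while rest:
--         if not rest[0]:
--             rest = rest[1:]
--         else:
--             k = 1
--             while k < len(rest) and rest[k]: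
--                 k += 1
--             res.append(k)
--             rest = rest[k:]
--     return res
-- ===== Notes on version B (the rewrite author's own statement) =====
-- stated objective: alternative
-- what changed: B partitions the list into maximal truthy runs (skip falsy head, measure the run, jump past it) and emits each run length directly, instead of A's single cumulative counter with end-of-block flushes.
import Mathlib
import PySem

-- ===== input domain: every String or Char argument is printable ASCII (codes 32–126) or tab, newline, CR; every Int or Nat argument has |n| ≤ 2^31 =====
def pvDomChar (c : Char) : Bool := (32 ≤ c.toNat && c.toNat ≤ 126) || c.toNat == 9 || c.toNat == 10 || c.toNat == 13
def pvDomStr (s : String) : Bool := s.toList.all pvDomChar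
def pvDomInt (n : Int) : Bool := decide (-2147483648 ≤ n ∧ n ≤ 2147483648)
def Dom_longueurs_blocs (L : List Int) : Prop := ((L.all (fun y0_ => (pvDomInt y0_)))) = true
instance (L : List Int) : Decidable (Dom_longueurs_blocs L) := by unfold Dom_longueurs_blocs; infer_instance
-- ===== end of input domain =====

-- B re-decomposes A's cumulative-counter pass as a jump-by-runs scan (same O(n) cost, different structure).

-- ===== PORT A =====
-- one step of A's for-loop: state = (ans, cumul)
def stepA (s : List Int × Int) (i : Int) : List Int × Int :=
  if i ≠ 0 then (s.1, s.2 + 1)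
  else if s.2 ≠ 0 then (s.1 ++ [s.2], 0)
  else s

def longueurs_blocs (L : List Int) : List Int :=
  let r := L.foldl stepA ([], 0)
  if r.2 ≠ 0 then r.1 ++ [r.2] else r.1

-- ===== PORT B =====
-- inner while of Source B: length of the truthy prefix (the run continuing after rest[0])
def runLen : List Int → Nat
  | [] => 0
  | x :: xs => if x ≠ 0 then 1 + runLen xs else 0

-- outer while of Source B: skip a falsy head, or emit the run length k = 1 + runLen xs and jump past the run
def longueurs_blocs_alt : List Int → List Int
  | [] => []
  | x :: xs =>
    if x = 0 then longueurs_blocs_alt xs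
    else ((1 + runLen xs : Nat) : Int) :: longueurs_blocs_alt (xs.drop (runLen xs))
termination_by L => L.length
decreasing_by
  · simp
  · simp [List.length_drop]

-- ===== PRECONDITION & SPEC =====
def Spec_longueurs_blocs (L : List Int) (out : List Int) : Prop := out = longueurs_blocs_alt L
instance (L : List Int) (out : List Int) : Decidable (Spec_longueurs_blocs L out) := by unfold Spec_longueurs_blocs; infer_instance

-- ===== CLAIM (what is proved, stated in full; the proofs are below) =====
def Claim_equal_longueurs_blocs : Prop := ∀ (L : List Int), Dom_longueurs_blocs L → Spec_longueurs_blocs L (longueurs_blocs L)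

-- ===== LEMMAS AND PROOFS =====

-- A's trailing flush
def finishA (r : List Int × Int) : List Int := if r.2 ≠ 0 then r.1 ++ [r.2] else r.1

lemma foldl_stepA_prefix : ∀ (xs : List Int) (ans : List Int) (c : Int),
    List.foldl stepA (ans, c) xs
      = (ans ++ (List.foldl stepA ([], c) xs).1, (List.foldl stepA ([], c) xs).2) := by
  intro xs
  induction xs with
  | nil => intro ans c; simp
  | cons x xs ih =>
    intro ans c
    simp only [List.foldl_cons, stepA]
    by_cases hx : x ≠ 0
    · simp [hx, ih ans (c + 1)]
    · by_cases hc : c ≠ 0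
      · simp [hx, hc, ih (ans ++ [c]) 0, ih [c] 0]
      · simp only [if_neg hx, if_neg hc]
        exact ih ans c

lemma finishA_prefix (xs : List Int) (ans : List Int) (c : Int) :
    finishA (List.foldl stepA (ans, c) xs) = ans ++ finishA (List.foldl stepA ([], c) xs) := by
  rw [foldl_stepA_prefix]
  unfold finishA
  split_ifs <;> simp

-- core invariant, proved for a positive carried counter and for counter 0 simultaneously
lemma main_inv : ∀ (n : Nat) (L : List Int), L.length ≤ n →
    (∀ c : Int, 0 < c →
        finishA (List.foldl stepA ([], c) L)
          = (c + (runLen L : Int)) :: longueurs_blocs_alt (L.drop (runLen L)))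
    ∧ finishA (List.foldl stepA ([], 0) L) = longueurs_blocs_alt L := by
  intro n
  induction n with
  | zero =>
    intro L hL
    have : L = [] := List.eq_nil_of_length_eq_zero (Nat.le_zero.mp hL)
    subst this
    constructor
    · intro c hc
      simp [finishA, runLen, longueurs_blocs_alt]
      omega
    · simp [finishA, longueurs_blocs_alt]
  | succ n ih =>
    intro L hL
    cases L with
    | nil =>
      constructor
      · intro c hc
        simp [finishA, runLen, longueurs_blocs_alt]
        omega
      · simp [finishA, longueurs_blocs_alt]
    | cons x xs =>
      have hxs : xs.length ≤ n := by simpa using hL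
      constructor
      · intro c hc
        by_cases hx : x = 0
        · subst hx
          simp only [List.foldl_cons, stepA]
          simp only [ne_eq, not_true_eq_false, if_false, if_pos (by omega : c ≠ 0), List.nil_append]
          rw [finishA_prefix xs [c] 0, (ih xs hxs).2]
          simp [runLen, longueurs_blocs_alt]
        · simp only [List.foldl_cons, stepA, if_pos (show x ≠ 0 from hx)]
          rw [(ih xs hxs).1 (c + 1) (by omega)]
          simp [runLen, hx]
          constructor
          · ring
          · rw [Nat.add_comm 1 (runLen xs), List.drop_succ_cons]
      · by_cases hx : x = 0
        · subst hx
          simp only [List.foldl_cons, stepA]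
          simp only [ne_eq, not_true_eq_false, if_false]
          rw [(ih xs hxs).2]
          simp [longueurs_blocs_alt]
        · simp only [List.foldl_cons, stepA, if_pos (show x ≠ 0 from hx)]
          rw [zero_add, (ih xs hxs).1 1 (by omega)]
          simp [longueurs_blocs_alt, hx]

-- ===== VERDICT (by name: the statement is the Claim_ definition above) =====
theorem longueurs_blocs_spec : Claim_equal_longueurs_blocs := by
  intro L _
  unfold Spec_longueurs_blocs
  exact (main_inv L.length L le_rfl).2
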